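-- pv_equiv track=rewrite | github.com/RichardHuang0001/email_summarizer | core/tools.py | _md_to_html
-- ===== SOURCE A (Python) =====
-- from typing import Optional, Type, List, Dict
--
-- def _md_to_html(md: str) -> str:
--     import html as _html
--     lines = md.splitlines()
--     buf: List[str] = []
--     in_ul = False
--     for line in lines:
--         if line.startswith("### "):
--             if in_ul:
--                 buf.append("</ul>")
--                 in_ul = False
--             buf.append(f"<h3>{_html.escape(line[4:].strip())}</h3>")
--         elif line.startswith("## "):
--             if in_ul:
--                 buf.append("</ul>")
--                 in_ul = False
--             buf.append(f"<h2>{_html.escape(line[3:].strip())}</h2>")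
--         elif line.startswith("- "):
--             if not in_ul:
--                 buf.append("<ul>")
--                 in_ul = True
--             buf.append(f"<li>{_html.escape(line[2:].strip())}</li>")
--         elif line.strip() == "":
--             if in_ul:
--                 buf.append("</ul>")
--                 in_ul = False
--             buf.append("<br/>")
--         else:
--             buf.append(f"<p>{_html.escape(line.strip())}</p>")
--     if in_ul:
--         buf.append("</ul>")
--     return "\n".join(buf)
-- ===== SOURCE B (Python) =====
-- def _md_to_html(md: str) -> str:
--     from itertools import groupby
--
--     def esc(s):
--         return (s.replace("&", "&amp;").replace("<", "&lt;").replace(">", "&gt;")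
--                  .replace('"', "&quot;").replace("'", "&#x27;"))
--
--     def token(line):
--         if line.startswith("### "):
--             return ("h3", f"<h3>{esc(line[4:].strip())}</h3>")
--         if line.startswith("## "):
--             return ("h2", f"<h2>{esc(line[3:].strip())}</h2>")
--         if line.startswith("- "):
--             return ("li", f"<li>{esc(line[2:].strip())}</li>")
--         if not line.strip():
--             return ("br", "<br/>")
--         return ("p", f"<p>{esc(line.strip())}</p>")
--
--     out = []
--     for kind, group in groupby(map(token, md.splitlines()), key=lambda t: t[0]):
--         htmls = [h for _, h in group]
--         if kind == "li":
--             out.append("<ul>")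
--             out.extend(htmls)
--             out.append("</ul>")
--         else:
--             out.extend(htmls)
--     return "\n".join(out)
-- ===== Notes on version B (the rewrite author's own statement) =====
-- stated objective: alternative
-- what changed: Replaces the stateful in_ul flag loop by a two-phase pipeline: tokenize every line to a (kind, html) pair, then render with itertools.groupby, wrapping each maximal run of list items in one <ul>...</ul>.
-- intended difference: On inputs where a markdown list-item line is immediately followed by a plain paragraph line, A leaves the <ul> open and emits the <p> (and anything after) inside the list, producing invalid HTML nesting; B closes the <ul> before the paragraph, which is the intended rendering. — e.g. on _md_to_html("- a\nb"): A returns "<ul>\n<li>a</li>\n<p>b</p>\n</ul>", B returns "<ul>\n<li>a</li>\n</ul>\n<p>b</p>"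
import Mathlib
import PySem

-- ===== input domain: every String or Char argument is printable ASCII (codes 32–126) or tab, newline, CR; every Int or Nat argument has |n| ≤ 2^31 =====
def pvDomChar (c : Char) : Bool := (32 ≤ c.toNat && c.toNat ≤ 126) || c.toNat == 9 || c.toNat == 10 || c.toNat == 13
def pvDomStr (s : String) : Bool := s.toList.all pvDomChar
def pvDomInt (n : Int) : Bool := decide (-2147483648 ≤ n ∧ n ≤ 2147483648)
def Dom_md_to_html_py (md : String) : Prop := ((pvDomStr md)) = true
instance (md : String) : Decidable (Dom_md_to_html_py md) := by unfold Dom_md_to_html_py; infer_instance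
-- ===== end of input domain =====

-- B tokenizes lines and wraps each maximal run of list items in one <ul> block (groupby),
-- instead of A's in_ul state flag; B intentionally closes a <ul> before a paragraph line (see D_).

-- shared helper: A calls html.escape(s, quote=True) and Source B's esc() writes out the same chain of
-- str.replace calls that html.escape performs ('&' first, then '<', '>', '"', "'"); this is the
-- step-for-step port of both.
def pyEscape (s : String) : String :=
  PySem.Str.replace
    (PySem.Str.replace
      (PySem.Str.replace
        (PySem.Str.replace
          (PySem.Str.replace s "&" "&amp;") "<" "&lt;") ">" "&gt;") "\"" "&quot;") "'" "&#x27;"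

-- ===== PORT A =====
def md_to_html_py (md : String) : String :=
  let lines := PySem.Str.splitlines md
  let st := lines.foldl (fun (st : List String × Bool) line =>
    if PySem.Str.startswith line "### " then
      ((if st.2 then st.1 ++ ["</ul>"] else st.1) ++
        ["<h3>" ++ pyEscape (PySem.Str.strip (PySem.Str.slice line (some 4) none)) ++ "</h3>"], false)
    else if PySem.Str.startswith line "## " then
      ((if st.2 then st.1 ++ ["</ul>"] else st.1) ++
        ["<h2>" ++ pyEscape (PySem.Str.strip (PySem.Str.slice line (some 3) none)) ++ "</h2>"], false)
    else if PySem.Str.startswith line "- " then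
      ((if st.2 then st.1 else st.1 ++ ["<ul>"]) ++
        ["<li>" ++ pyEscape (PySem.Str.strip (PySem.Str.slice line (some 2) none)) ++ "</li>"], true)
    else if PySem.Str.strip line = "" then
      ((if st.2 then st.1 ++ ["</ul>"] else st.1) ++ ["<br/>"], false)
    else
      (st.1 ++ ["<p>" ++ pyEscape (PySem.Str.strip line) ++ "</p>"], st.2)) ([], false)
  PySem.Str.join "\n" (if st.2 then st.1 ++ ["</ul>"] else st.1)

-- ===== PORT B =====
inductive PvKind | h3 | h2 | li | br | p
deriving DecidableEq, Repr

def pvTok (line : String) : PvKind × String :=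
  if PySem.Str.startswith line "### " then
    (PvKind.h3, "<h3>" ++ pyEscape (PySem.Str.strip (PySem.Str.slice line (some 4) none)) ++ "</h3>")
  else if PySem.Str.startswith line "## " then
    (PvKind.h2, "<h2>" ++ pyEscape (PySem.Str.strip (PySem.Str.slice line (some 3) none)) ++ "</h2>")
  else if PySem.Str.startswith line "- " then
    (PvKind.li, "<li>" ++ pyEscape (PySem.Str.strip (PySem.Str.slice line (some 2) none)) ++ "</li>")
  else if PySem.Str.strip line = "" then
    (PvKind.br, "<br/>")
  else
    (PvKind.p, "<p>" ++ pyEscape (PySem.Str.strip line) ++ "</p>")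

-- itertools.groupby over the kind: maximal runs of equal kind
def pvGroups : List (PvKind × String) → List (PvKind × List String)
  | [] => []
  | t :: rest =>
    (t.1, t.2 :: (rest.takeWhile (·.1 = t.1)).map (·.2)) ::
      pvGroups (rest.dropWhile (·.1 = t.1))
termination_by ts => ts.length
decreasing_by
  have := List.length_dropWhile_le (·.1 = t.1) rest; simp; omega

def pvRenderGroup (g : PvKind × List String) : List String :=
  if g.1 = PvKind.li then "<ul>" :: g.2 ++ ["</ul>"] else g.2

def md_to_html_py_alt (md : String) : String :=
  PySem.Str.join "\n"
    ((pvGroups ((PySem.Str.splitlines md).map pvTok)).flatMap pvRenderGroup)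

-- ===== PRECONDITION & SPEC =====
-- shape conditions on a single input line (the task's line grammar, with its branch precedence):
-- a list-item line, and a plain paragraph line
def pvIsLiLine (l : String) : Bool :=
  !PySem.Str.startswith l "### " && !PySem.Str.startswith l "## " && PySem.Str.startswith l "- "
def pvIsPLine (l : String) : Bool :=
  !PySem.Str.startswith l "### " && !PySem.Str.startswith l "## " &&
    !PySem.Str.startswith l "- " && !(PySem.Str.strip l == "")

-- some line of the input is a list-item line immediately followed by a plain paragraph line
def pvHasLiP : List String → Bool
  | a :: b :: rest => (pvIsLiLine a && pvIsPLine b) || pvHasLiP (b :: rest)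
  | _ => false

-- On inputs where a markdown list-item line is immediately followed by a plain paragraph line,
-- A leaves the <ul> open and emits the <p> inside the list (invalid HTML nesting); B closes the
-- <ul> before the paragraph, which is the intended rendering.
def D_md_to_html_py (md : String) : Prop :=
  pvHasLiP (PySem.Str.splitlines md) = true
instance (md : String) : Decidable (D_md_to_html_py md) := by unfold D_md_to_html_py; infer_instance

def Spec_md_to_html_py (md : String) (out : String) : Prop :=
  ¬ D_md_to_html_py md → out = md_to_html_py_alt md
instance (md : String) (out : String) : Decidable (Spec_md_to_html_py md out) := by unfold Spec_md_to_html_py; infer_instance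

def pvDiffWitness_md_to_html_py : String := "- a\nb"
def pvDiffWitnessOut_md_to_html_py : String × String :=
  ("<ul>\n<li>a</li>\n<p>b</p>\n</ul>", "<ul>\n<li>a</li>\n</ul>\n<p>b</p>")

-- ===== CLAIM (what is proved, stated in full; the proofs are below) =====
def Claim_unchanged_md_to_html_py : Prop :=
  ∀ (md : String), Dom_md_to_html_py md → Spec_md_to_html_py md (md_to_html_py md)
def Claim_changed_md_to_html_py : Prop :=
  Dom_md_to_html_py (pvDiffWitness_md_to_html_py) ∧
  D_md_to_html_py (pvDiffWitness_md_to_html_py) ∧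
  md_to_html_py (pvDiffWitness_md_to_html_py) = pvDiffWitnessOut_md_to_html_py.1 ∧
  md_to_html_py_alt (pvDiffWitness_md_to_html_py) = pvDiffWitnessOut_md_to_html_py.2 ∧
  pvDiffWitnessOut_md_to_html_py.1 ≠ pvDiffWitnessOut_md_to_html_py.2
def Claim_exact_md_to_html_py : Prop :=
  ∀ (md : String), Dom_md_to_html_py md → D_md_to_html_py md →
    md_to_html_py md ≠ md_to_html_py_alt md

-- ===== LEMMAS AND PROOFS =====

-- A's loop body, named for reasoning (definitionally the lambda in md_to_html_py)
def pvStepA (st : List String × Bool) (line : String) : List String × Bool :=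
  if PySem.Str.startswith line "### " then
    ((if st.2 then st.1 ++ ["</ul>"] else st.1) ++
      ["<h3>" ++ pyEscape (PySem.Str.strip (PySem.Str.slice line (some 4) none)) ++ "</h3>"], false)
  else if PySem.Str.startswith line "## " then
    ((if st.2 then st.1 ++ ["</ul>"] else st.1) ++
      ["<h2>" ++ pyEscape (PySem.Str.strip (PySem.Str.slice line (some 3) none)) ++ "</h2>"], false)
  else if PySem.Str.startswith line "- " then
    ((if st.2 then st.1 else st.1 ++ ["<ul>"]) ++
      ["<li>" ++ pyEscape (PySem.Str.strip (PySem.Str.slice line (some 2) none)) ++ "</li>"], true)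
  else if PySem.Str.strip line = "" then
    ((if st.2 then st.1 ++ ["</ul>"] else st.1) ++ ["<br/>"], false)
  else
    (st.1 ++ ["<p>" ++ pyEscape (PySem.Str.strip line) ++ "</p>"], st.2)

def pvClose (st : List String × Bool) : List String :=
  if st.2 then st.1 ++ ["</ul>"] else st.1

def pvNext (line : String) (b : Bool) : Bool :=
  match (pvTok line).1 with
  | PvKind.li => true
  | PvKind.p => b
  | _ => false

def pvEmit (line : String) (b : Bool) : List String :=
  match pvTok line with
  | (PvKind.li, s) => (if b then [] else ["<ul>"]) ++ [s]
  | (PvKind.p, s) => [s]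
  | (_, s) => (if b then ["</ul>"] else []) ++ [s]

def pvAux : List String → Bool → List String
  | [], b => if b then ["</ul>"] else []
  | l :: ls, b => pvEmit l b ++ pvAux ls (pvNext l b)

theorem pvIsLiLine_iff (l : String) : pvIsLiLine l = true ↔ (pvTok l).1 = PvKind.li := by
  unfold pvIsLiLine pvTok
  by_cases h1 : PySem.Str.startswith l "### " <;> by_cases h2 : PySem.Str.startswith l "## " <;>
    by_cases h3 : PySem.Str.startswith l "- " <;> by_cases h4 : PySem.Str.strip l = "" <;>
      simp_all [PySem.Str.startswith]

theorem pvIsPLine_iff (l : String) : pvIsPLine l = true ↔ (pvTok l).1 = PvKind.p := by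
  unfold pvIsPLine pvTok
  by_cases h1 : PySem.Str.startswith l "### " <;> by_cases h2 : PySem.Str.startswith l "## " <;>
    by_cases h3 : PySem.Str.startswith l "- " <;> by_cases h4 : PySem.Str.strip l = "" <;>
      simp_all [PySem.Str.startswith]

theorem pvStepA_eq (st : List String × Bool) (l : String) :
    pvStepA st l = (st.1 ++ pvEmit l st.2, pvNext l st.2) := by
  unfold pvStepA pvEmit pvNext pvTok
  split_ifs with h1 h2 h3 h4 <;> cases st.2 <;> simp

theorem pvFoldA (lines : List String) (buf : List String) (b : Bool) :
    pvClose (lines.foldl pvStepA (buf, b)) = buf ++ pvAux lines b := by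
  induction lines generalizing buf b with
  | nil => cases b <;> simp [pvClose, pvAux]
  | cons l ls ih =>
    simp only [List.foldl_cons, pvStepA_eq, pvAux, ih, List.append_assoc]

-- splitting a leading non-li run off the grouped rendering changes nothing
theorem pvGroups_flat_split (k : PvKind) (hk : k ≠ PvKind.li) (ts : List (PvKind × String)) :
    (pvGroups ts).flatMap pvRenderGroup =
      (ts.takeWhile (·.1 = k)).map (·.2) ++
        (pvGroups (ts.dropWhile (·.1 = k))).flatMap pvRenderGroup := by
  induction ts with
  | nil => simp
  | cons t rest ih =>
    by_cases h : t.1 = k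
    · rw [pvGroups]
      simp only [List.takeWhile_cons, List.dropWhile_cons, h, decide_true, if_true]
      simp only [List.flatMap_cons, pvRenderGroup]
      rw [if_neg hk]
      simp
    · simp [List.takeWhile_cons, List.dropWhile_cons, h]

-- flatMap-rendering after a leading non-li token = that token's html then the rest's rendering
theorem pvGroups_flat_cons (t : PvKind × String) (ts : List (PvKind × String))
    (hne : t.1 ≠ PvKind.li) :
    (pvGroups (t :: ts)).flatMap pvRenderGroup =
      t.2 :: (pvGroups ts).flatMap pvRenderGroup := by
  rw [pvGroups]
  simp only [List.flatMap_cons, pvRenderGroup, hne, if_false]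
  rw [pvGroups_flat_split t.1 hne ts]
  simp

-- the relation of D_, on already-tokenised lines
def pvOk (a b : String) : Prop := ¬ ((pvTok a).1 = PvKind.li ∧ (pvTok b).1 = PvKind.p)

theorem pvHasLiP_tail (a : String) (ls : List String) (h : pvHasLiP (a :: ls) = false) :
    pvHasLiP ls = false := by
  cases ls with
  | nil => rfl
  | cons b r =>
    rw [pvHasLiP, Bool.or_eq_false_iff] at h
    exact h.2

theorem pvHasLiP_head (a b : String) (r : List String) (h : pvHasLiP (a :: b :: r) = false)
    (ha : (pvTok a).1 = PvKind.li) : (pvTok b).1 ≠ PvKind.p := by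
  rw [pvHasLiP, Bool.or_eq_false_iff, Bool.and_eq_false_iff] at h
  intro hb
  rcases h.1 with h1 | h1
  · exact absurd ((pvIsLiLine_iff a).mpr ha) (by simp [h1])
  · exact absurd ((pvIsPLine_iff b).mpr hb) (by simp [h1])

theorem pvAux_render (lines : List String) (hc : pvHasLiP lines = false) :
    pvAux lines false = (pvGroups (lines.map pvTok)).flatMap pvRenderGroup ∧
      ((∀ h : lines ≠ [], (pvTok (lines.head h)).1 ≠ PvKind.p) →
        pvAux lines true =
          ((lines.map pvTok).takeWhile (·.1 = PvKind.li)).map (·.2) ++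
            "</ul>" :: (pvGroups ((lines.map pvTok).dropWhile (·.1 = PvKind.li))).flatMap
              pvRenderGroup) := by
  induction lines with
  | nil => simp [pvAux, pvGroups]
  | cons l ls ih =>
    have ih' := ih (pvHasLiP_tail l ls hc)
    rcases hk : pvTok l with ⟨k, s⟩
    have hhd : k = PvKind.li → ∀ h : ls ≠ [], (pvTok (ls.head h)).1 ≠ PvKind.p := by
      intro hkli h
      cases ls with
      | nil => exact absurd rfl h
      | cons b r => exact pvHasLiP_head l b r hc (by rw [hk, hkli])
    constructor
    · -- b = false
      cases k with
      | li =>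
        have h2 := ih'.2 (hhd rfl)
        simp only [pvAux, pvEmit, pvNext, hk]
        rw [h2]
        simp only [List.map_cons, pvGroups]
        simp only [List.flatMap_cons, pvRenderGroup, if_true]
        simp [hk]
      | p =>
        simp only [pvAux, pvEmit, pvNext, hk]
        rw [ih'.1, List.map_cons, pvGroups_flat_cons _ _ (by simp [hk])]
        simp [hk]
      | h3 =>
        simp only [pvAux, pvEmit, pvNext, hk]
        rw [ih'.1, List.map_cons, pvGroups_flat_cons _ _ (by simp [hk])]
        simp [hk]
      | h2 =>
        simp only [pvAux, pvEmit, pvNext, hk]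
        rw [ih'.1, List.map_cons, pvGroups_flat_cons _ _ (by simp [hk])]
        simp [hk]
      | br =>
        simp only [pvAux, pvEmit, pvNext, hk]
        rw [ih'.1, List.map_cons, pvGroups_flat_cons _ _ (by simp [hk])]
        simp [hk]
    · -- b = true
      intro hhead
      cases k with
      | li =>
        have h2 := ih'.2 (hhd rfl)
        simp only [pvAux, pvEmit, pvNext, hk]
        rw [h2]
        simp [List.takeWhile_cons, hk]
      | p =>
        exact absurd (by simp [hk]) (hhead (by simp))
      | h3 =>
        simp only [pvAux, pvEmit, pvNext, hk]
        rw [ih'.1]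
        have ht : ((l :: ls).map pvTok).takeWhile (·.1 = PvKind.li) = [] := by
          simp [List.takeWhile_cons, hk]
        rw [ht]
        have hd : ((l :: ls).map pvTok).dropWhile (·.1 = PvKind.li) = pvTok l :: ls.map pvTok := by
          simp [List.dropWhile_cons, hk]
        rw [hd, pvGroups_flat_cons _ _ (by simp [hk])]
        simp [hk]
      | h2 =>
        simp only [pvAux, pvEmit, pvNext, hk]
        rw [ih'.1]
        have ht : ((l :: ls).map pvTok).takeWhile (·.1 = PvKind.li) = [] := by
          simp [List.takeWhile_cons, hk]
        rw [ht]
        have hd : ((l :: ls).map pvTok).dropWhile (·.1 = PvKind.li) = pvTok l :: ls.map pvTok := by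
          simp [List.dropWhile_cons, hk]
        rw [hd, pvGroups_flat_cons _ _ (by simp [hk])]
        simp [hk]
      | br =>
        simp only [pvAux, pvEmit, pvNext, hk]
        rw [ih'.1]
        have ht : ((l :: ls).map pvTok).takeWhile (·.1 = PvKind.li) = [] := by
          simp [List.takeWhile_cons, hk]
        rw [ht]
        have hd : ((l :: ls).map pvTok).dropWhile (·.1 = PvKind.li) = pvTok l :: ls.map pvTok := by
          simp [List.dropWhile_cons, hk]
        rw [hd, pvGroups_flat_cons _ _ (by simp [hk])]
        simp [hk]

-- ===== tightness: A ≠ B everywhere inside D_ =====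

-- two buffers that agree on a prefix and then carry incomparable elements
def pvDiverges (l1 l2 : List String) : Prop :=
  ∃ P x xs y ys, l1 = P ++ x :: xs ∧ l2 = P ++ y :: ys ∧
    ¬ x.toList <+: y.toList ∧ ¬ y.toList <+: x.toList

theorem pvDiverges_cons (a : String) (l1 l2 : List String) (h : pvDiverges l1 l2) :
    pvDiverges (a :: l1) (a :: l2) := by
  obtain ⟨P, x, xs, y, ys, h1, h2, h3, h4⟩ := h
  exact ⟨a :: P, x, xs, y, ys, by simp [h1], by simp [h2], h3, h4⟩

theorem pvJoin_cons_of_ne_nil (sep a : List Char) (l : List (List Char)) (h : l ≠ []) :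
    PySem.Chars.join sep (a :: l) = a ++ sep ++ PySem.Chars.join sep l := by
  cases l with
  | nil => exact absurd rfl h
  | cons b t => exact PySem.Chars.join_cons_cons ..

theorem pvChars_join_ne (sep : List Char) (P : List (List Char)) (x y : List Char)
    (xs ys : List (List Char)) (hxy : ¬ x <+: y) (hyx : ¬ y <+: x) :
    PySem.Chars.join sep (P ++ x :: xs) ≠ PySem.Chars.join sep (P ++ y :: ys) := by
  induction P with
  | nil =>
    intro he
    have hx : x <+: PySem.Chars.join sep (x :: xs) := by
      cases xs with
      | nil => simp [PySem.Chars.join_singleton]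
      | cons a l =>
        rw [PySem.Chars.join_cons_cons, List.append_assoc]
        exact List.prefix_append ..
    have hy : y <+: PySem.Chars.join sep (y :: ys) := by
      cases ys with
      | nil => simp [PySem.Chars.join_singleton]
      | cons a l =>
        rw [PySem.Chars.join_cons_cons, List.append_assoc]
        exact List.prefix_append ..
    simp only [List.nil_append] at he
    rw [he] at hx
    rcases List.prefix_or_prefix_of_prefix hx hy with h | h
    · exact hxy h
    · exact hyx h
  | cons p P ih =>
    intro he
    rw [List.cons_append, List.cons_append,
      pvJoin_cons_of_ne_nil sep p _ (by simp),
      pvJoin_cons_of_ne_nil sep p _ (by simp)] at he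
    rw [List.append_assoc, List.append_assoc] at he
    exact ih (List.append_cancel_left (List.append_cancel_left he))

theorem pvJoin_ne (l1 l2 : List String) (h : pvDiverges l1 l2) :
    PySem.Str.join "\n" l1 ≠ PySem.Str.join "\n" l2 := by
  obtain ⟨P, x, xs, y, ys, h1, h2, hxy, hyx⟩ := h
  intro he
  have he2 := congrArg String.toList he
  rw [PySem.Str.toList_join, PySem.Str.toList_join, h1, h2] at he2
  simp only [List.map_append, List.map_cons] at he2
  exact pvChars_join_ne _ _ _ _ _ _ hxy hyx he2

-- at a list item followed by a paragraph, A's next buffer element "<p>…" and B's "</ul>" split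
theorem pvDiverges_p_ul (e : String) (r : List Char) (hx : e.toList = '<' :: 'p' :: r)
    (xs ys : List String) : pvDiverges (e :: xs) ("</ul>" :: ys) := by
  refine ⟨[], e, xs, "</ul>", ys, rfl, rfl, ?_, ?_⟩ <;>
    · rw [hx, show "</ul>".toList = ['<', '/', 'u', 'l', '>'] from rfl]
      simp [List.cons_prefix_cons]

theorem pvTok_p_snd (l : String) (h : (pvTok l).1 = PvKind.p) :
    (pvTok l).2 = "<p>" ++ pyEscape (PySem.Str.strip l) ++ "</p>" := by
  unfold pvTok at *
  split_ifs at * <;> simp_all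

theorem pvHasLiP_cons_or (l : String) (ls : List String) (h : pvHasLiP (l :: ls) = true)
    (hli : (pvTok l).1 = PvKind.li) :
    pvHasLiP ls = true ∨ ∃ h' : ls ≠ [], (pvTok (ls.head h')).1 = PvKind.p := by
  cases ls with
  | nil => simp [pvHasLiP] at h
  | cons b r =>
    rw [pvHasLiP, Bool.or_eq_true] at h
    rcases h with h | h
    · exact Or.inr ⟨by simp, (pvIsPLine_iff b).mp (Bool.and_eq_true .. |>.mp h).2⟩
    · exact Or.inl h

theorem pvHasLiP_cons_not_li (l : String) (ls : List String) (h : pvHasLiP (l :: ls) = true)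
    (hli : (pvTok l).1 ≠ PvKind.li) : pvHasLiP ls = true := by
  cases ls with
  | nil => simp [pvHasLiP] at h
  | cons b r =>
    rw [pvHasLiP, Bool.or_eq_true] at h
    rcases h with h | h
    · exact absurd ((pvIsLiLine_iff l).mp (Bool.and_eq_true .. |>.mp h).1) hli
    · exact h

theorem pvAux_tight (lines : List String) :
    (pvHasLiP lines = true →
      pvDiverges (pvAux lines false) ((pvGroups (lines.map pvTok)).flatMap pvRenderGroup)) ∧
    ((pvHasLiP lines = true ∨ ∃ h : lines ≠ [], (pvTok (lines.head h)).1 = PvKind.p) →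
      pvDiverges (pvAux lines true)
        (((lines.map pvTok).takeWhile (·.1 = PvKind.li)).map (·.2) ++
          "</ul>" :: (pvGroups ((lines.map pvTok).dropWhile (·.1 = PvKind.li))).flatMap
            pvRenderGroup)) := by
  induction lines with
  | nil =>
    constructor
    · intro h; simp [pvHasLiP] at h
    · rintro (h | ⟨h, -⟩)
      · simp [pvHasLiP] at h
      · exact absurd rfl h
  | cons l ls ih =>
    rcases hk : pvTok l with ⟨k, s⟩
    constructor
    · -- b = false
      intro h
      cases k with
      | li =>
        have hd := ih.2 (pvHasLiP_cons_or l ls h (by rw [hk]))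
        simp only [pvAux, pvEmit, pvNext, hk]
        simp only [List.map_cons, pvGroups]
        simp only [List.flatMap_cons, pvRenderGroup, if_true]
        have hd2 := pvDiverges_cons "<ul>" _ _ (pvDiverges_cons s _ _ hd)
        simpa [hk] using hd2
      | p =>
        have hd := ih.1 (pvHasLiP_cons_not_li l ls h (by rw [hk]; simp))
        simp only [pvAux, pvEmit, pvNext, hk]
        rw [List.map_cons, pvGroups_flat_cons _ _ (by simp [hk]), hk]
        simpa using pvDiverges_cons s _ _ hd
      | h3 =>
        have hd := ih.1 (pvHasLiP_cons_not_li l ls h (by rw [hk]; simp))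
        simp only [pvAux, pvEmit, pvNext, hk]
        rw [List.map_cons, pvGroups_flat_cons _ _ (by simp [hk]), hk]
        simpa using pvDiverges_cons s _ _ hd
      | h2 =>
        have hd := ih.1 (pvHasLiP_cons_not_li l ls h (by rw [hk]; simp))
        simp only [pvAux, pvEmit, pvNext, hk]
        rw [List.map_cons, pvGroups_flat_cons _ _ (by simp [hk]), hk]
        simpa using pvDiverges_cons s _ _ hd
      | br =>
        have hd := ih.1 (pvHasLiP_cons_not_li l ls h (by rw [hk]; simp))
        simp only [pvAux, pvEmit, pvNext, hk]
        rw [List.map_cons, pvGroups_flat_cons _ _ (by simp [hk]), hk]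
        simpa using pvDiverges_cons s _ _ hd
    · -- b = true
      intro h
      cases k with
      | p =>
        -- immediate divergence: A keeps the open <ul> and emits the paragraph, B closes it
        simp only [pvAux, pvEmit, pvNext, hk]
        have ht : ((l :: ls).map pvTok).takeWhile (·.1 = PvKind.li) = [] := by
          simp [List.takeWhile_cons, hk]
        rw [ht]
        have hs : s = "<p>" ++ pyEscape (PySem.Str.strip l) ++ "</p>" := by
          have := pvTok_p_snd l (by rw [hk])
          rwa [hk] at this
        simp only [List.nil_append, List.singleton_append]
        exact pvDiverges_p_ul s ('>' :: (pyEscape (PySem.Str.strip l)).toList ++ "</p>".toList)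
          (by simp [hs]) _ _
      | li =>
        have hor : pvHasLiP (l :: ls) = true := by
          rcases h with h | ⟨h', hp⟩
          · exact h
          · rw [List.head_cons, hk] at hp; cases hp
        have hd := ih.2 (pvHasLiP_cons_or l ls hor (by rw [hk]))
        simp only [pvAux, pvEmit, pvNext, hk]
        simp only [List.map_cons, List.takeWhile_cons, hk]
        simpa using pvDiverges_cons s _ _ hd
      | h3 =>
        have hor : pvHasLiP ls = true := by
          rcases h with h | ⟨h', hp⟩
          · exact pvHasLiP_cons_not_li l ls h (by rw [hk]; simp)
          · rw [List.head_cons, hk] at hp; cases hp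
        have hd := ih.1 hor
        simp only [pvAux, pvEmit, pvNext, hk]
        have ht : ((l :: ls).map pvTok).takeWhile (·.1 = PvKind.li) = [] := by
          simp [List.takeWhile_cons, hk]
        rw [ht]
        have hdrop : ((l :: ls).map pvTok).dropWhile (·.1 = PvKind.li) = pvTok l :: ls.map pvTok := by
          simp [List.dropWhile_cons, hk]
        rw [hdrop, pvGroups_flat_cons _ _ (by simp [hk]), hk]
        simpa using pvDiverges_cons "</ul>" _ _ (pvDiverges_cons s _ _ hd)
      | h2 =>
        have hor : pvHasLiP ls = true := by
          rcases h with h | ⟨h', hp⟩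
          · exact pvHasLiP_cons_not_li l ls h (by rw [hk]; simp)
          · rw [List.head_cons, hk] at hp; cases hp
        have hd := ih.1 hor
        simp only [pvAux, pvEmit, pvNext, hk]
        have ht : ((l :: ls).map pvTok).takeWhile (·.1 = PvKind.li) = [] := by
          simp [List.takeWhile_cons, hk]
        rw [ht]
        have hdrop : ((l :: ls).map pvTok).dropWhile (·.1 = PvKind.li) = pvTok l :: ls.map pvTok := by
          simp [List.dropWhile_cons, hk]
        rw [hdrop, pvGroups_flat_cons _ _ (by simp [hk]), hk]
        simpa using pvDiverges_cons "</ul>" _ _ (pvDiverges_cons s _ _ hd)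
      | br =>
        have hor : pvHasLiP ls = true := by
          rcases h with h | ⟨h', hp⟩
          · exact pvHasLiP_cons_not_li l ls h (by rw [hk]; simp)
          · rw [List.head_cons, hk] at hp; cases hp
        have hd := ih.1 hor
        simp only [pvAux, pvEmit, pvNext, hk]
        have ht : ((l :: ls).map pvTok).takeWhile (·.1 = PvKind.li) = [] := by
          simp [List.takeWhile_cons, hk]
        rw [ht]
        have hdrop : ((l :: ls).map pvTok).dropWhile (·.1 = PvKind.li) = pvTok l :: ls.map pvTok := by
          simp [List.dropWhile_cons, hk]
        rw [hdrop, pvGroups_flat_cons _ _ (by simp [hk]), hk]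
        simpa using pvDiverges_cons "</ul>" _ _ (pvDiverges_cons s _ _ hd)

-- ===== VERDICT (by name: the statements are the Claim_ definitions above) =====
theorem md_to_html_py_spec : Claim_unchanged_md_to_html_py := by
  intro md _ hnd
  show md_to_html_py md = md_to_html_py_alt md
  have ht : pvHasLiP (PySem.Str.splitlines md) = false := by
    unfold D_md_to_html_py at hnd
    simpa using hnd
  have h1 : md_to_html_py md =
      PySem.Str.join "\n" (pvClose ((PySem.Str.splitlines md).foldl pvStepA ([], false))) := rfl
  rw [h1, pvFoldA, (pvAux_render (PySem.Str.splitlines md) ht).1]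
  rfl

theorem md_to_html_py_changed : Claim_changed_md_to_html_py := by
  unfold Claim_changed_md_to_html_py
  refine ⟨by decide, by decide, by rfl, ?_, by decide⟩
  have h : (PySem.Str.splitlines pvDiffWitness_md_to_html_py).map pvTok =
      [(PvKind.li, "<li>a</li>"), (PvKind.p, "<p>b</p>")] := by decide
  rw [show md_to_html_py_alt pvDiffWitness_md_to_html_py =
      PySem.Str.join "\n" ((pvGroups ((PySem.Str.splitlines pvDiffWitness_md_to_html_py).map pvTok)).flatMap pvRenderGroup) from rfl, h]
  rw [show pvGroups [(PvKind.li, "<li>a</li>"), (PvKind.p, "<p>b</p>")] =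
      [(PvKind.li, ["<li>a</li>"]), (PvKind.p, ["<p>b</p>"])] from by
    rw [pvGroups]; simp [pvGroups]]
  decide

theorem md_to_html_py_tight : Claim_exact_md_to_html_py := by
  intro md _ hd
  unfold D_md_to_html_py at hd
  have hdiv := (pvAux_tight (PySem.Str.splitlines md)).1 hd
  have h1 : md_to_html_py md =
      PySem.Str.join "\n" (pvClose ((PySem.Str.splitlines md).foldl pvStepA ([], false))) := rfl
  rw [h1, pvFoldA]
  simpa using pvJoin_ne _ _ hdiv
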